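-- pv_equiv track=rewrite | github.com/Anwarvic/Code-Switched-Corpus-Evaluator | evaluator.py | _count_matrix_tokens
-- ===== SOURCE A (Python) =====
-- from collections import Counter
--
-- def _count_matrix_tokens(tags, exclude_tags):
--     """
--     Counts the number of tokens in the matrix language of an utterance; a
--     matrix langauge is the most frequent language in the utterance.
--
--     Parameters
--     ----------
--     tags : list
--         List of language tags in an utterance.
--     exclude_tags : set
--         A set of language-independent tags to exclude.
--
--     Returns
--     -------
--     matrix_tokens_count : int
--         Number of tokens in the matrix language of an utterance.
--
--     Examples
--     --------
--     >>> self._count_matrix_tokens(['O', 'O', 'O', 'O', 'O'], {'O'})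
--     0
--     >>> self._count_matrix_tokens(['ar', 'ar', 'O', 'en', 'ar'], {'O'})
--     3
--     """
--     matrix_tag = ""
--     matrix_tokens_count = 0
--     for tag, count in Counter(tags).items():
--         if tag not in exclude_tags:
--             if count > matrix_tokens_count:
--                 matrix_tokens_count = count
--                 matrix_tag = tag
--     return matrix_tag, matrix_tokens_count
-- ===== SOURCE B (Python) =====
-- def _count_matrix_tokens(tags, exclude_tags):
--     # No Counter/dict at all: scan positions; a position i is the first
--     # occurrence of its tag iff tag not in tags[:i]; count that tag with
--     # list.count and keep the strict argmax.  First-occurrence order makes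
--     # ties resolve exactly as Counter insertion order does.
--     best_tag, best_count = "", 0
--     for i, tag in enumerate(tags):
--         if tag in exclude_tags or tag in tags[:i]:
--             continue
--         c = tags.count(tag)
--         if c > best_count:
--             best_tag, best_count = tag, c
--     return best_tag, best_count
-- ===== Notes on version B (the rewrite author's own statement) =====
-- stated objective: alternative
-- what changed: B drops the Counter/hash-map entirely: it scans positions, detects first occurrences via membership in the prefix tags[:i], and counts each distinct tag with list.count in a nested scan, keeping the strict argmax; A builds a Counter and then argmax-scans its items.
import Mathlib
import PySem

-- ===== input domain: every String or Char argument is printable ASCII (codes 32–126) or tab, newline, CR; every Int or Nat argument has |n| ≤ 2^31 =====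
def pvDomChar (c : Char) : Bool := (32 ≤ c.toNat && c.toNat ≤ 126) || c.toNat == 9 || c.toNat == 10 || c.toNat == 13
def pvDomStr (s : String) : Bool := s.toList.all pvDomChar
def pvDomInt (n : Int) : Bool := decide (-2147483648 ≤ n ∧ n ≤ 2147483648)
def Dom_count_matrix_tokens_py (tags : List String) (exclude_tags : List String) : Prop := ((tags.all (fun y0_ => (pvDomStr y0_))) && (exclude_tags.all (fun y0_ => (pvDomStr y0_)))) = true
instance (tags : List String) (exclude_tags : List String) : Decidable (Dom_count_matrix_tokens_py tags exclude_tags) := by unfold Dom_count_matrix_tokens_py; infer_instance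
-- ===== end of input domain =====

-- B replaces A's Counter + argmax-scan by a dict-free nested scan: first occurrences detected via the prefix tags[:i], counts via list.count; same result.


-- ===== PORT A =====
def count_matrix_tokens_py (tags : List String) (exclude_tags : List String) : String × Int :=
  ((PySem.Dict.counter tags).items).foldl
    (fun acc kv =>
      if !exclude_tags.contains kv.1 then
        if kv.2 > acc.2 then kv else acc
      else acc)
    ("", 0)

-- ===== PORT B =====
def count_matrix_tokens_py_alt (tags : List String) (exclude_tags : List String) : String × Int :=
  (PySem.List.enumerate tags 0).foldl
    (fun acc p =>
      if exclude_tags.contains p.2 || (PySem.List.slice tags none (some p.1)).contains p.2 then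
        acc
      else
        let c : Int := tags.count p.2
        if c > acc.2 then (p.2, c) else acc)
    ("", 0)

-- ===== PRECONDITION & SPEC =====
def Spec_count_matrix_tokens_py (tags : List String) (exclude_tags : List String) (out : String × Int) : Prop := out = count_matrix_tokens_py_alt tags exclude_tags
instance (tags : List String) (exclude_tags : List String) (out : String × Int) : Decidable (Spec_count_matrix_tokens_py tags exclude_tags out) := by unfold Spec_count_matrix_tokens_py; infer_instance

-- ===== CLAIM (what is proved, stated in full; the proofs are below) =====
def Claim_equal_count_matrix_tokens_py : Prop := ∀ (tags : List String) (exclude_tags : List String), Dom_count_matrix_tokens_py tags exclude_tags → Spec_count_matrix_tokens_py tags exclude_tags (count_matrix_tokens_py tags exclude_tags)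

-- ===== LEMMAS AND PROOFS =====

-- the first occurrences of a list, in order, are exactly PySem.Set.ofList
lemma firsts_eq_set : ∀ (xs pre : List String),
    PySem.Set.ofList pre ++
      ((PySem.List.enumerate xs (pre.length : Int)).filter
        (fun p => !(PySem.List.slice (pre ++ xs) none (some p.1)).contains p.2)).map (·.2)
      = List.foldl PySem.Set.add (PySem.Set.ofList pre) xs := by
  intro xs
  induction xs with
  | nil => intro pre; simp [PySem.List.enumerate_nil]
  | cons x t ih =>
    intro pre
    rw [PySem.List.enumerate_cons]
    have hslice : PySem.List.slice (pre ++ x :: t) none (some (pre.length : Int)) = pre := by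
      rw [PySem.List.slice_to_natCast]; simp
    have hof : PySem.Set.ofList (pre ++ [x]) = PySem.Set.add (PySem.Set.ofList pre) x := by
      simp [PySem.Set.ofList_eq_foldl, List.foldl_append]
    have happ : pre ++ x :: t = (pre ++ [x]) ++ t := by simp
    have hlen : ((pre ++ [x]).length : Int) = (pre.length : Int) + 1 := by simp
    by_cases hx : x ∈ pre
    · have hc : pre.contains x = true := by simpa using hx
      have hadd : PySem.Set.add (PySem.Set.ofList pre) x = PySem.Set.ofList pre := by
        simp [PySem.Set.add, hx]
      rw [List.filter_cons_of_neg (by simp [hslice]; exact hx), List.foldl_cons, hadd]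
      have := ih (pre ++ [x])
      rw [hof, hadd, hlen] at this
      rw [← this, happ]
    · have hc : pre.contains x = false := by simpa using hx
      have hadd : PySem.Set.add (PySem.Set.ofList pre) x = PySem.Set.ofList pre ++ [x] := by
        simp [PySem.Set.add, hx]
      rw [List.filter_cons_of_pos (by simp [hslice]; exact hx), List.foldl_cons, hadd]
      have := ih (pre ++ [x])
      rw [hof, hadd, hlen] at this
      rw [List.map_cons, ← this, happ]
      simp
-- specialised to the whole list
lemma firsts_eq_set' (tags : List String) :
    ((PySem.List.enumerate tags 0).filter
        (fun p => !(PySem.List.slice tags none (some p.1)).contains p.2)).map (·.2)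
      = PySem.Set.ofList tags := by
  have := firsts_eq_set tags []
  simpa [PySem.Set.ofList_eq_foldl] using this

-- the per-position fold with the exclusion test equals the per-key fold over the tags (·.2)
lemma push_fold (tags exclude_tags : List String) (L : List (Int × String)) :
    ∀ (a : String × Int),
      L.foldl
        (fun acc p =>
          if exclude_tags.contains p.2 then acc
          else if ((tags.count p.2 : Int)) > acc.2 then (p.2, (tags.count p.2 : Int)) else acc) a
      = (L.map (·.2)).foldl
          (fun acc k =>
            if !exclude_tags.contains k then
              if ((tags.count k : Int)) > acc.2 then (k, (tags.count k : Int)) else acc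
            else acc) a := by
  induction L with
  | nil => intro a; rfl
  | cons p L ih =>
    intro a
    simp only [List.foldl_cons, List.map_cons]
    by_cases h : p.2 ∈ exclude_tags
    · rw [if_pos (show exclude_tags.contains p.2 = true by simpa using h),
          if_neg (show ¬ ((!exclude_tags.contains p.2) = true) by simpa using h)]
      exact ih _
    · rw [if_neg (show ¬ (exclude_tags.contains p.2 = true) by simpa using h),
          if_pos (show (!exclude_tags.contains p.2) = true by simpa using h)]
      exact ih _

-- ===== VERDICT (by name: the statement is the Claim_ definition above) =====
theorem count_matrix_tokens_py_spec : Claim_equal_count_matrix_tokens_py := by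
  intro tags exclude_tags _
  unfold Spec_count_matrix_tokens_py count_matrix_tokens_py count_matrix_tokens_py_alt
  -- A: fold over Counter items = per-key fold over the distinct tags
  rw [PySem.Dict.items_counter, List.foldl_map]
  -- B: split off the first-occurrence test, filter, then fold per key
  have hflip :
      (fun (acc : String × Int) (p : Int × String) =>
        if exclude_tags.contains p.2 || (PySem.List.slice tags none (some p.1)).contains p.2 then acc
        else
          let c : Int := tags.count p.2
          if c > acc.2 then (p.2, c) else acc)
      = (fun acc p =>
          if !(PySem.List.slice tags none (some p.1)).contains p.2 then
            (if exclude_tags.contains p.2 then acc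
             else if ((tags.count p.2 : Int)) > acc.2 then (p.2, (tags.count p.2 : Int)) else acc)
          else acc) := by
    funext acc p
    by_cases h1 : p.2 ∈ exclude_tags <;>
      by_cases h2 : p.2 ∈ PySem.List.slice tags none (some p.1) <;>
        simp [h1, h2]
  rw [hflip,
      PySem.List.foldl_if_eq_foldl_filter
        (p := fun p : Int × String => !(PySem.List.slice tags none (some p.1)).contains p.2)
        (f := fun acc p =>
          if exclude_tags.contains p.2 then acc
          else if ((tags.count p.2 : Int)) > acc.2 then (p.2, (tags.count p.2 : Int)) else acc),
      push_fold, firsts_eq_set']
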